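-- pv_equiv track=rewrite | github.com/DerDodo/AdventOfCode2023 | solutions/level13.py | are_rows_equal
-- ===== SOURCE A (Python) =====
-- def are_rows_equal(row1: list[str], row2: list[str], smudge_available: bool) -> tuple[bool, bool]:
--     one_off_available = smudge_available
--     for i in range(0, len(row1)):
--         if row1[i] != row2[i]:
--             if one_off_available:
--                 one_off_available = False
--             else:
--                 return False, smudge_available
--     return True, one_off_available
-- ===== SOURCE B (Python) =====
-- def are_rows_equal(row1: list[str], row2: list[str], smudge_available: bool) -> tuple[bool, bool]:
--     count = sum(1 for i in range(len(row1)) if row1[i] != row2[i])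
--     if count == 0:
--         return True, smudge_available
--     if count == 1 and smudge_available:
--         return True, False
--     return False, smudge_available
-- ===== Notes on version B (the rewrite author's own statement) =====
-- stated objective: simpler
-- what changed: Replaces the early-exit scan that threads a mutable smudge flag with a count-then-decide decomposition: one pass counts all mismatching positions, then a three-way branch on the count picks the result.
-- outside the precondition, e.g. on are_rows_equal(['a', 'b'], ['c'], False): A returns (False, False), B raises IndexError
import Mathlib
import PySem

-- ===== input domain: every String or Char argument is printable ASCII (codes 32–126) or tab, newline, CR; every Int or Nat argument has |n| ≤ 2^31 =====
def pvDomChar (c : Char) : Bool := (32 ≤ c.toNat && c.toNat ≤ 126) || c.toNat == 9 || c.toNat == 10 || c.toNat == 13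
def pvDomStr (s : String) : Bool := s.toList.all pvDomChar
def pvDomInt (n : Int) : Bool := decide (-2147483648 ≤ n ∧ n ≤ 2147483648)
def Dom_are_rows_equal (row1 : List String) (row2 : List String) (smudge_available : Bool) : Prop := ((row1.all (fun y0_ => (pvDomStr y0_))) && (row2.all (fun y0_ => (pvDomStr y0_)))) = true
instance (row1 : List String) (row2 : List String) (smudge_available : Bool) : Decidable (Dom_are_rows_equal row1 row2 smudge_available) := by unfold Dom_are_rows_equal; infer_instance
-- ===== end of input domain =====

-- B replaces A's early-exit scan with a count-mismatches-then-decide decomposition (objective: simpler).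

-- ===== PORT A =====
-- the for-loop of A, threading one_off_available; indexing via getD is exact under
-- Pre_ (every index 0 ≤ i < len row1 is in range for both lists)
def pvALoop (row1 : List String) (row2 : List String) (smudge_available : Bool) (i : Nat) (one_off : Bool) : Bool × Bool :=
  if _h : i < row1.length then
    if row1.getD i "" ≠ row2.getD i "" then
      if one_off then pvALoop row1 row2 smudge_available (i+1) false
      else (false, smudge_available)
    else pvALoop row1 row2 smudge_available (i+1) one_off
  else (true, one_off)
termination_by row1.length - i

def are_rows_equal (row1 : List String) (row2 : List String) (smudge_available : Bool) : Bool × Bool :=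
  pvALoop row1 row2 smudge_available 0 smudge_available

-- ===== PORT B =====
-- the generator sum over range(len(row1)): counts mismatching positions from index i on
def pvMisCount (row1 : List String) (row2 : List String) (i : Nat) : Nat :=
  if _h : i < row1.length then
    (if row1.getD i "" ≠ row2.getD i "" then 1 else 0) + pvMisCount row1 row2 (i+1)
  else 0
termination_by row1.length - i

def are_rows_equal_alt (row1 : List String) (row2 : List String) (smudge_available : Bool) : Bool × Bool :=
  let count := pvMisCount row1 row2 0
  if count = 0 then (true, smudge_available)
  else if count = 1 ∧ smudge_available then (true, false)
  else (false, smudge_available)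

-- ===== PRECONDITION & SPEC =====
-- Pre_ excludes row2 shorter than row1: there row2[i] can raise IndexError — B's full
-- count always raises when such a position exists, while A may early-return a value first
-- (e.g. (["a","b"], ["c"], False): A returns (False, False), B raises IndexError).
def Pre_are_rows_equal (row1 : List String) (row2 : List String) (smudge_available : Bool) : Prop :=
  row1.length ≤ row2.length
instance (row1 : List String) (row2 : List String) (smudge_available : Bool) : Decidable (Pre_are_rows_equal row1 row2 smudge_available) := by unfold Pre_are_rows_equal; infer_instance

def pvWitness_are_rows_equal : List String × List String × Bool := (["#.", ".."], ["#.", ".#"], true)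

def Spec_are_rows_equal (row1 : List String) (row2 : List String) (smudge_available : Bool) (out : Bool × Bool) : Prop := out = are_rows_equal_alt row1 row2 smudge_available
instance (row1 : List String) (row2 : List String) (smudge_available : Bool) (out : Bool × Bool) : Decidable (Spec_are_rows_equal row1 row2 smudge_available out) := by unfold Spec_are_rows_equal; infer_instance

-- ===== CLAIM (what is proved, stated in full; the proofs are below) =====
def Claim_equal_are_rows_equal : Prop := ∀ (row1 : List String) (row2 : List String) (smudge_available : Bool), Dom_are_rows_equal row1 row2 smudge_available → Pre_are_rows_equal row1 row2 smudge_available → Spec_are_rows_equal row1 row2 smudge_available (are_rows_equal row1 row2 smudge_available)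

-- ===== LEMMAS AND PROOFS =====

-- step/done unfoldings of the two recursions
theorem pvALoop_step (row1 row2 : List String) (s : Bool) (i : Nat) (o : Bool)
    (h : i < row1.length) :
    pvALoop row1 row2 s i o =
      if row1.getD i "" ≠ row2.getD i "" then
        (if o then pvALoop row1 row2 s (i+1) false else (false, s))
      else pvALoop row1 row2 s (i+1) o := by
  rw [pvALoop]; simp [h]

theorem pvALoop_done (row1 row2 : List String) (s : Bool) (i : Nat) (o : Bool)
    (h : ¬ i < row1.length) : pvALoop row1 row2 s i o = (true, o) := by
  rw [pvALoop]; simp [h]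

theorem pvMisCount_step (row1 row2 : List String) (i : Nat) (h : i < row1.length) :
    pvMisCount row1 row2 i =
      (if row1.getD i "" ≠ row2.getD i "" then 1 else 0) + pvMisCount row1 row2 (i+1) := by
  rw [pvMisCount]; simp [h]

theorem pvMisCount_done (row1 row2 : List String) (i : Nat) (h : ¬ i < row1.length) :
    pvMisCount row1 row2 i = 0 := by
  rw [pvMisCount]; simp [h]

-- the loop from index i, characterised by the mismatch count from i
theorem pvALoop_count (row1 : List String) (row2 : List String) (smudge_available : Bool) (i : Nat) :
    (pvALoop row1 row2 smudge_available i true =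
      (if pvMisCount row1 row2 i = 0 then (true, true)
       else if pvMisCount row1 row2 i = 1 then (true, false)
       else (false, smudge_available))) ∧
    (pvALoop row1 row2 smudge_available i false =
      (if pvMisCount row1 row2 i = 0 then (true, false) else (false, smudge_available))) := by
  by_cases h : i < row1.length
  · have ih := pvALoop_count row1 row2 smudge_available (i+1)
    rw [pvALoop_step row1 row2 smudge_available i true h,
        pvALoop_step row1 row2 smudge_available i false h,
        pvMisCount_step row1 row2 i h]
    by_cases hm : row1.getD i "" ≠ row2.getD i ""
    · rw [if_pos hm, if_pos hm, if_pos hm]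
      refine ⟨?_, ?_⟩
      · rw [if_pos rfl, ih.2]
        rcases Nat.eq_zero_or_pos (pvMisCount row1 row2 (i+1)) with h0 | h0
        · simp [h0]
        · rw [if_neg (by omega), if_neg (by omega), if_neg (by omega)]
      · rw [if_neg (by simp), if_neg (by omega)]
    · rw [if_neg hm, if_neg hm, if_neg hm]
      simpa using ih
  · rw [pvALoop_done row1 row2 smudge_available i true h,
        pvALoop_done row1 row2 smudge_available i false h,
        pvMisCount_done row1 row2 i h]
    simp

termination_by row1.length - i

theorem are_rows_equal_spec : Claim_equal_are_rows_equal := by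
  intro row1 row2 smudge _dom _pre
  unfold Spec_are_rows_equal are_rows_equal are_rows_equal_alt
  have h := pvALoop_count row1 row2 smudge 0
  cases smudge
  · rw [h.2]
    rcases Nat.eq_zero_or_pos (pvMisCount row1 row2 0) with h0 | h0
    · simp [h0]
    · rw [if_neg (by omega), if_neg (by omega), if_neg (by simp)]
  · rw [h.1]
    rcases Nat.eq_zero_or_pos (pvMisCount row1 row2 0) with h0 | h0
    · simp [h0]
    · by_cases h1 : pvMisCount row1 row2 0 = 1
      · rw [if_neg (by omega), if_pos h1, if_neg (by omega), if_pos (by simp [h1])]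
      · rw [if_neg (by omega), if_neg h1, if_neg (by omega), if_neg (by simp [h1])]
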